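-- pv_equiv track=rewrite | github.com/julasim/KI_WIKI_OS | ki_wiki_bot.py | _format_suggestion_briefing
-- ===== SOURCE A (Python) =====
-- def _format_suggestion_briefing(suggestions: list) -> str:
--     """Formatiert Suggestions als Telegram-HTML mit Antwort-Anleitung."""
--     if not suggestions:
--         return ""
--     type_labels = {
--         "preference": "✨ <b>PRÄFERENZEN</b> (Stil/Antwort-Regeln)",
--         "fact": "📌 <b>FAKTEN</b> (Bio/Setup über dich)",
--         "project_context": "🎯 <b>PROJEKT-KONTEXT</b> (Projekt-Regeln)",
--     }
--     by_type: dict = {}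
--     for i, s in enumerate(suggestions, 1):
--         by_type.setdefault(s["type"], []).append((i, s))
--
--     msg = "🌙 <b>Memory-Vorschläge</b> <i>(Analyse der letzten 24h)</i>\n"
--     for ptype in ("preference", "fact", "project_context"):
--         items = by_type.get(ptype, [])
--         if not items:
--             continue
--         msg += f"\n{type_labels[ptype]}\n"
--         for i, s in items:
--             extra = ""
--             if ptype == "project_context" and s.get("project_slug"):
--                 extra = f" <i>[{s['project_slug']}]</i>"
--             msg += f"<b>{i}.</b> {_esc_html(s['text'])}{extra}\n"
--             if s.get("evidence"):
--                 msg += f"   <i>Grund: {_esc_html(s['evidence'][:120])}</i>\n"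
--
--     msg += (
--         "\n────────────\n"
--         "<b>Wie du antwortest:</b>\n"
--         "• <code>1 3</code> oder <code>1,3</code> → speichert nur 1 und 3\n"
--         "• <code>alle</code> oder <code>ja</code> → alle übernehmen\n"
--         "• <code>0</code> oder <code>nein</code> → alle verwerfen\n"
--         "• <code>erkläre 2</code> → mehr Detail zu Vorschlag 2"
--     )
--     return msg
--
-- def _esc_html(s: str) -> str:
--     return s.replace("&", "&amp;").replace("<", "&lt;").replace(">", "&gt;")
-- ===== SOURCE B (Python) =====
-- _HEADER = "🌙 <b>Memory-Vorschläge</b> <i>(Analyse der letzten 24h)</i>\n"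
--
-- _FOOTER = (
--     "\n────────────\n"
--     "<b>Wie du antwortest:</b>\n"
--     "• <code>1 3</code> oder <code>1,3</code> → speichert nur 1 und 3\n"
--     "• <code>alle</code> oder <code>ja</code> → alle übernehmen\n"
--     "• <code>0</code> oder <code>nein</code> → alle verwerfen\n"
--     "• <code>erkläre 2</code> → mehr Detail zu Vorschlag 2"
-- )
--
-- _SECTIONS = (
--     ("preference", "✨ <b>PRÄFERENZEN</b> (Stil/Antwort-Regeln)"),
--     ("fact", "📌 <b>FAKTEN</b> (Bio/Setup über dich)"),
--     ("project_context", "🎯 <b>PROJEKT-KONTEXT</b> (Projekt-Regeln)"),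
-- )
--
--
-- def _esc_char(c: str) -> str:
--     if c == "&":
--         return "&amp;"
--     if c == "<":
--         return "&lt;"
--     if c == ">":
--         return "&gt;"
--     return c
--
--
-- def _esc_html(s: str) -> str:
--     return "".join(_esc_char(c) for c in s)
--
--
-- def _entry(i: int, s: dict, ptype: str) -> str:
--     extra = ""
--     if ptype == "project_context" and s.get("project_slug"):
--         extra = " <i>[" + s["project_slug"] + "]</i>"
--     out = "<b>" + str(i) + ".</b> " + _esc_html(s["text"]) + extra + "\n"
--     ev = s.get("evidence")
--     if ev:
--         out += "   <i>Grund: " + _esc_html(ev[:120]) + "</i>\n"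
--     return out
--
--
-- def _section(suggestions: list, ptype: str) -> str:
--     return "".join(
--         _entry(i, s, ptype)
--         for i, s in enumerate(suggestions, 1)
--         if s["type"] == ptype
--     )
--
--
-- def _format_suggestion_briefing(suggestions: list) -> str:
--     """Formatiert Suggestions als Telegram-HTML mit Antwort-Anleitung."""
--     if not suggestions:
--         return ""
--     body = ""
--     for ptype, label in _SECTIONS:
--         sec = _section(suggestions, ptype)
--         if sec:
--             body += "\n" + label + "\n" + sec
--     return _HEADER + body + _FOOTER
-- ===== Notes on version B (the rewrite author's own statement) =====
-- stated objective: simpler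
-- what changed: The by_type grouping dict is gone: B formats each of the three sections by a direct filtering join over enumerate(suggestions, 1), builds the body by concatenating the non-empty sections, and escapes HTML character-by-character via a single mapping instead of three sequential str.replace passes.
import Mathlib
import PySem

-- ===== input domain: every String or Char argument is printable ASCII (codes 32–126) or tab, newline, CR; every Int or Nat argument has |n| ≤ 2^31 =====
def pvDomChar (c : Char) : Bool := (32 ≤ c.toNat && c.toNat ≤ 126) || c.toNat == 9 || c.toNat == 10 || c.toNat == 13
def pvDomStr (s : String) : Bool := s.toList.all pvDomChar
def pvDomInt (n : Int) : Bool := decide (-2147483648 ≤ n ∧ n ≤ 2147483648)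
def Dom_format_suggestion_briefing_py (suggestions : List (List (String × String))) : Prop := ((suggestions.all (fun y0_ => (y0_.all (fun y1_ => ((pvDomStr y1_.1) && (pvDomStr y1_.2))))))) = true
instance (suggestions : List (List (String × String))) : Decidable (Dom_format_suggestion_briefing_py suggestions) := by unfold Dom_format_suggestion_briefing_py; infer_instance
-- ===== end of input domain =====

-- B drops A's by_type grouping dict: each of the three sections is produced by a direct filtering
-- join over the enumerated suggestions, the body is the concatenation of the non-empty sections,
-- and HTML escaping maps each character once instead of three sequential str.replace passes
-- (objective: simpler). Equivalence is about the return value only (no argument is mutated).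

-- ===== PORT A =====

-- s.get(k, d) on the dict s (first match); also the total form of s[k], exact under Pre_
-- (which excludes the KeyError inputs)
def sgetD (s : List (String × String)) (k d : String) : String := (PySem.Dict.mk s).getD k d

def escHtml_py (s : String) : String :=
  PySem.Str.replace (PySem.Str.replace (PySem.Str.replace s "&" "&amp;") "<" "&lt;") ">" "&gt;"

def typeLabel (ptype : String) : String :=
  (PySem.Dict.mk
    [("preference", "✨ <b>PRÄFERENZEN</b> (Stil/Antwort-Regeln)"),
     ("fact", "📌 <b>FAKTEN</b> (Bio/Setup über dich)"),
     ("project_context", "🎯 <b>PROJEKT-KONTEXT</b> (Projekt-Regeln)")]).getD ptype ""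

def pvHeader : String := "🌙 <b>Memory-Vorschläge</b> <i>(Analyse der letzten 24h)</i>\n"

def pvFooter : String :=
  "\n────────────\n" ++
  "<b>Wie du antwortest:</b>\n" ++
  "• <code>1 3</code> oder <code>1,3</code> → speichert nur 1 und 3\n" ++
  "• <code>alle</code> oder <code>ja</code> → alle übernehmen\n" ++
  "• <code>0</code> oder <code>nein</code> → alle verwerfen\n" ++
  "• <code>erkläre 2</code> → mehr Detail zu Vorschlag 2"

-- the body of A's inner 'for i, s in items' loop (msg accumulation)
def itemLineA (msg : String) (ptype : String) (p : Int × List (String × String)) : String :=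
  let extra : String :=
    if ptype = "project_context" ∧ sgetD p.2 "project_slug" "" ≠ "" then
      " <i>[" ++ sgetD p.2 "project_slug" "" ++ "]</i>"
    else ""
  let msg := msg ++ "<b>" ++ PySem.Int.toStr p.1 ++ ".</b> " ++ escHtml_py (sgetD p.2 "text" "") ++ extra ++ "\n"
  if sgetD p.2 "evidence" "" ≠ "" then
    msg ++ "   <i>Grund: " ++ escHtml_py (PySem.Str.slice (sgetD p.2 "evidence" "") none (some 120)) ++ "</i>\n"
  else msg

def format_suggestion_briefing_py (suggestions : List (List (String × String))) : String :=
  if suggestions = [] then "" else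
  -- by_type.setdefault(s["type"], []).append((i, s))  ==  d[k] = d.get(k, []) + [(i, s)]
  (["preference", "fact", "project_context"].foldl (fun msg ptype =>
      let items := ((PySem.List.enumerate suggestions 1).foldl
        (fun d p => d.modify (sgetD p.2 "type" "") [] (· ++ [p])) PySem.Dict.empty).getD ptype []
      if items = [] then msg
      else (items.foldl (fun m p => itemLineA m ptype p) (msg ++ "\n" ++ typeLabel ptype ++ "\n")))
    pvHeader) ++ pvFooter

-- ===== PORT B =====

def bHeader : String := "🌙 <b>Memory-Vorschläge</b> <i>(Analyse der letzten 24h)</i>\n"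

def bFooter : String :=
  "\n────────────\n" ++
  "<b>Wie du antwortest:</b>\n" ++
  "• <code>1 3</code> oder <code>1,3</code> → speichert nur 1 und 3\n" ++
  "• <code>alle</code> oder <code>ja</code> → alle übernehmen\n" ++
  "• <code>0</code> oder <code>nein</code> → alle verwerfen\n" ++
  "• <code>erkläre 2</code> → mehr Detail zu Vorschlag 2"

def bSections : List (String × String) :=
  [("preference", "✨ <b>PRÄFERENZEN</b> (Stil/Antwort-Regeln)"),
   ("fact", "📌 <b>FAKTEN</b> (Bio/Setup über dich)"),
   ("project_context", "🎯 <b>PROJEKT-KONTEXT</b> (Projekt-Regeln)")]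

-- s.get(k, "") read directly off the association list (a Python dict has unique keys,
-- so the first match IS the binding)
def bGet (s : List (String × String)) (k : String) : String :=
  match s.find? (fun q => q.1 == k) with
  | some q => q.2
  | none => ""

def escCharB (c : Char) : String :=
  if c = '&' then "&amp;"
  else if c = '<' then "&lt;"
  else if c = '>' then "&gt;"
  else String.singleton c

-- ''.join(_esc_char(c) for c in s) as the structural recursion over the characters
def escJoin : List Char → String
  | [] => ""
  | c :: t => escCharB c ++ escJoin t

def escHtmlB (s : String) : String := escJoin s.toList

def entryB (i : Int) (s : List (String × String)) (ptype : String) : String :=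
  let extra : String :=
    if ptype = "project_context" ∧ bGet s "project_slug" ≠ "" then
      " <i>[" ++ bGet s "project_slug" ++ "]</i>"
    else ""
  let out := "<b>" ++ PySem.Int.toStr i ++ ".</b> " ++ escHtmlB (bGet s "text") ++ extra ++ "\n"
  let ev := bGet s "evidence"
  if ev ≠ "" then out ++ "   <i>Grund: " ++ escHtmlB (PySem.Str.slice ev none (some 120)) ++ "</i>\n"
  else out

-- ''.join(_entry(i, s, ptype) for i, s in enumerate(suggestions, 1) if s["type"] == ptype)
def sectionB (ptype : String) : List (Int × List (String × String)) → String
  | [] => ""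
  | p :: rest =>
      (if bGet p.2 "type" == ptype then entryB p.1 p.2 ptype else "") ++ sectionB ptype rest

-- the 'for ptype, label in _SECTIONS' body accumulation
def bodyB (suggestions : List (List (String × String))) : List (String × String) → String
  | [] => ""
  | pl :: rest =>
      (let sec := sectionB pl.1 (PySem.List.enumerate suggestions 1)
       if sec = "" then "" else "\n" ++ pl.2 ++ "\n" ++ sec) ++ bodyB suggestions rest

def format_suggestion_briefing_py_alt (suggestions : List (List (String × String))) : String :=
  if suggestions = [] then "" else
  bHeader ++ bodyB suggestions bSections ++ bFooter

-- ===== PRECONDITION & SPEC =====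
-- Pre_ excludes exactly the KeyError inputs of the Python: every suggestion must carry a "type" key,
-- and a suggestion whose type is one of the three emitted kinds must carry a "text" key.
def Pre_format_suggestion_briefing_py (suggestions : List (List (String × String))) : Prop :=
  (suggestions.all (fun s =>
    (s.map Prod.fst).contains "type" &&
    (!(["preference", "fact", "project_context"].contains (sgetD s "type" "")) ||
      (s.map Prod.fst).contains "text"))) = true
instance (suggestions : List (List (String × String))) : Decidable (Pre_format_suggestion_briefing_py suggestions) := by unfold Pre_format_suggestion_briefing_py; infer_instance

def pvWitness_format_suggestion_briefing_py : (List (List (String × String))) :=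
  [[("type", "fact"), ("text", "a&b"), ("evidence", "why")],
   [("type", "project_context"), ("text", "<x>"), ("project_slug", "slug")],
   [("type", "other")]]

def Spec_format_suggestion_briefing_py (suggestions : List (List (String × String))) (out : String) : Prop := out = format_suggestion_briefing_py_alt suggestions
instance (suggestions : List (List (String × String))) (out : String) : Decidable (Spec_format_suggestion_briefing_py suggestions out) := by unfold Spec_format_suggestion_briefing_py; infer_instance

-- ===== CLAIM (what is proved, stated in full; the proofs are below) =====
def Claim_equal_format_suggestion_briefing_py : Prop := ∀ (suggestions : List (List (String × String))), Dom_format_suggestion_briefing_py suggestions → Pre_format_suggestion_briefing_py suggestions → Spec_format_suggestion_briefing_py suggestions (format_suggestion_briefing_py suggestions)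

-- ===== LEMMAS AND PROOFS =====

-- the two lookups agree: Dict.mk keeps the FIRST binding of a key
theorem get?_mk_find? (s : List (String × String)) (k : String) :
    (PySem.Dict.mk s).get? k = (s.find? (fun q => q.1 == k)).map Prod.snd := by
  induction s with
  | nil => rfl
  | cons q rest ih =>
    rw [PySem.Dict.get?_mk_cons, List.find?]
    by_cases h : q.1 == k <;> simp [h, ih]

theorem bGet_eq_sgetD (s : List (String × String)) (k : String) : bGet s k = sgetD s k "" := by
  rw [show sgetD s k "" = ((PySem.Dict.mk s).get? k).getD "" from rfl, get?_mk_find?]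
  unfold bGet
  cases s.find? (fun q => q.1 == k) <;> rfl

-- PySem.Chars.replace with a single-character pattern is the per-character flatMap
theorem replace_go_single (ch : Char) (new : List Char) :
    ∀ (cs : List Char) (fuel : Nat) (acc : List Char), cs.length ≤ fuel →
      PySem.Chars.replace.go [ch] new fuel cs acc
        = acc.reverse ++ cs.flatMap (fun c => if c = ch then new else [c]) := by
  intro cs
  induction cs with
  | nil => intro fuel acc _; cases fuel <;> simp [PySem.Chars.replace.go]
  | cons c t ih =>
    intro fuel acc hle
    match fuel with
    | 0 => simp at hle
    | fuel + 1 =>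
      have hstep : PySem.Chars.replace.go [ch] new (fuel+1) (c :: t) acc =
          if List.isPrefixOf [ch] (c :: t) then
            PySem.Chars.replace.go [ch] new fuel (List.drop (List.length [ch]) (c :: t)) (new.reverse ++ acc)
          else PySem.Chars.replace.go [ch] new fuel t (c :: acc) := by
        simp [PySem.Chars.replace.go]
      rw [hstep]
      have hlen : t.length ≤ fuel := by simpa using hle
      by_cases h : c = ch
      · rw [if_pos (by simp [List.isPrefixOf, h])]
        simp only [List.length_cons, List.length_nil, Nat.zero_add, List.drop_succ_cons, List.drop_zero]
        rw [ih _ _ hlen]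
        simp [h, List.flatMap_cons]
      · rw [if_neg (by simp [List.isPrefixOf]; exact fun hc => h hc.symm)]
        rw [ih _ _ hlen]
        simp [h, List.flatMap_cons]

theorem replace_single (cs : List Char) (ch : Char) (new : List Char) :
    PySem.Chars.replace cs [ch] new = cs.flatMap (fun c => if c = ch then new else [c]) := by
  have h : ([ch] : List Char).isEmpty = false := rfl
  simp only [PySem.Chars.replace, h, Bool.false_eq_true, if_false]
  simpa using replace_go_single ch new cs cs.length [] le_rfl

-- the three sequential replaces compose to the single per-character escape
theorem escHtml_eq (s : String) : escHtml_py s = escHtmlB s := by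
  rw [← String.toList_inj]
  have hb : ∀ cs : List Char, (escJoin cs).toList = cs.flatMap (fun c => (escCharB c).toList) := by
    intro cs
    induction cs with
    | nil => rfl
    | cons c t ih => simp [escJoin, String.toList_append, ih]
  have ha : (escHtml_py s).toList
      = ((s.toList.flatMap (fun c => if c = '&' then "&amp;".toList else [c])).flatMap
          (fun c => if c = '<' then "&lt;".toList else [c])).flatMap
          (fun c => if c = '>' then "&gt;".toList else [c]) := by
    simp only [escHtml_py, PySem.Str.toList_replace]
    rw [show ("&" : String).toList = ['&'] from rfl, show ("<" : String).toList = ['<'] from rfl,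
        show (">" : String).toList = ['>'] from rfl,
        replace_single, replace_single, replace_single]
  rw [ha, show (escHtmlB s).toList = (escJoin s.toList).toList from rfl, hb]
  generalize s.toList = cs
  induction cs with
  | nil => rfl
  | cons c t ih =>
    simp only [List.flatMap_cons, List.flatMap_append]
    rw [ih]
    have hc : (List.flatMap (fun c => if c = '>' then "&gt;".toList else [c])
        (List.flatMap (fun c => if c = '<' then "&lt;".toList else [c])
          (if c = '&' then "&amp;".toList else [c]))) = (escCharB c).toList := by
      by_cases h1 : c = '&'
      · subst h1; decide
      · rw [if_neg h1]
        by_cases h2 : c = '<'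
        · subst h2; decide
        · by_cases h3 : c = '>'
          · subst h3; decide
          · simp [escCharB, h1, h2, h3, String.toList_singleton]
    rw [hc]

-- A's grouping dict read back at key c is the filter of the enumerated list
theorem byType_getD (l : List (Int × List (String × String)))
    (d : PySem.Dict String (List (Int × List (String × String)))) (c : String) :
    (l.foldl (fun d p => d.modify (sgetD p.2 "type" "") [] (· ++ [p])) d).getD c []
      = d.getD c [] ++ l.filter (fun p => sgetD p.2 "type" "" == c) := by
  induction l generalizing d with
  | nil => simp
  | cons p l ih =>
    simp only [List.foldl, List.filter_cons]
    rw [ih, PySem.Dict.getD_modify]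
    by_cases h : sgetD p.2 "type" "" = c
    · rw [if_pos h.symm, if_pos (by simp [h])]
      simp [h, List.append_assoc]
    · rw [if_neg (fun hc => h hc.symm), if_neg (by simp [h])]

-- one step of A's msg loop appends exactly B's entry string
theorem itemLineA_eq (msg ptype : String) (p : Int × List (String × String)) :
    itemLineA msg ptype p = msg ++ entryB p.1 p.2 ptype := by
  unfold itemLineA entryB
  simp only [← bGet_eq_sgetD, escHtml_eq]
  by_cases h1 : ptype = "project_context" ∧ bGet p.2 "project_slug" ≠ "" <;>
    by_cases h2 : bGet p.2 "evidence" = "" <;>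
      simp [h1, h2, String.append_assoc]

-- A's inner fold over the items of one type is msg ++ B's section string over the same items
theorem foldl_itemLineA (items : List (Int × List (String × String))) (ptype msg : String) :
    items.foldl (fun m p => itemLineA m ptype p) msg
      = msg ++ (items.map (fun p => entryB p.1 p.2 ptype)).foldr (· ++ ·) "" := by
  induction items generalizing msg with
  | nil => simp
  | cons p items ih =>
    simp only [List.foldl, List.map_cons, List.foldr]
    rw [ih, itemLineA_eq, String.append_assoc]

-- B's section string is that same fold over the filtered enumeration
theorem sectionB_eq (ptype : String) (l : List (Int × List (String × String))) :
    sectionB ptype l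
      = ((l.filter (fun p => sgetD p.2 "type" "" == ptype)).map
          (fun p => entryB p.1 p.2 ptype)).foldr (· ++ ·) "" := by
  induction l with
  | nil => rfl
  | cons p l ih =>
    simp only [sectionB, List.filter_cons, bGet_eq_sgetD]
    by_cases h : sgetD p.2 "type" "" == ptype
    · rw [if_pos h, if_pos h]
      simp [ih]
    · rw [if_neg (by simpa using h), if_neg (by simpa using h)]
      simp [ih]

theorem entryB_ne_empty (i : Int) (s : List (String × String)) (ptype : String) :
    entryB i s ptype ≠ "" := by
  intro h
  unfold entryB at h
  simp only [String.append_eq_empty_iff] at h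
  split_ifs at h <;> simp at h

theorem foldr_entries_empty_iff (ptype : String) (m : List (Int × List (String × String))) :
    ((m.map (fun p => entryB p.1 p.2 ptype)).foldr (· ++ ·) "" = "") ↔ m = [] := by
  cases m with
  | nil => simp
  | cons p rest =>
    simp only [List.map_cons, List.foldr, List.cons_ne_nil, iff_false]
    rw [String.append_eq_empty_iff]
    exact fun h => entryB_ne_empty p.1 p.2 ptype h.1

theorem sectionB_empty_iff (ptype : String) (l : List (Int × List (String × String))) :
    sectionB ptype l = "" ↔ l.filter (fun p => sgetD p.2 "type" "" == ptype) = [] := by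
  rw [sectionB_eq]
  exact foldr_entries_empty_iff ptype _

-- the outer loops: A's fold over the type names = B's recursion over the (type, label) pairs
theorem outer_eq (suggestions : List (List (String × String))) :
    ∀ (ls : List (String × String)) (msg : String), (∀ q ∈ ls, typeLabel q.1 = q.2) →
    ((ls.map Prod.fst).foldl (fun msg ptype =>
      let items := ((PySem.List.enumerate suggestions 1).foldl
        (fun d p => d.modify (sgetD p.2 "type" "") [] (· ++ [p])) PySem.Dict.empty).getD ptype []
      if items = [] then msg
      else (items.foldl (fun m p => itemLineA m ptype p) (msg ++ "\n" ++ typeLabel ptype ++ "\n")))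
      msg)
      = msg ++ bodyB suggestions ls := by
  intro ls
  induction ls with
  | nil => intro msg _; simp [bodyB]
  | cons pl rest ih =>
    intro msg hlbl
    simp only [List.map_cons, List.foldl, bodyB]
    rw [byType_getD]
    simp only [PySem.Dict.getD_empty, List.nil_append]
    rw [ih _ (fun q hq => hlbl q (List.mem_cons_of_mem _ hq))]
    have hsec := sectionB_eq pl.1 (PySem.List.enumerate suggestions 1)
    have hiff := sectionB_empty_iff pl.1 (PySem.List.enumerate suggestions 1)
    by_cases h : (PySem.List.enumerate suggestions 1).filter
        (fun p => sgetD p.2 "type" "" == pl.1) = []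
    · rw [if_pos h]
      have hz : sectionB pl.1 (PySem.List.enumerate suggestions 1) = "" := hiff.mpr h
      simp [hz]
    · rw [if_neg h]
      have hne : sectionB pl.1 (PySem.List.enumerate suggestions 1) ≠ "" := fun hc => h (hiff.mp hc)
      rw [foldl_itemLineA, ← hsec, if_neg hne, hlbl pl (List.mem_cons_self)]
      simp [String.append_assoc]

-- ===== VERDICT (by name: the statement is the Claim_ definition above) =====
theorem format_suggestion_briefing_py_spec : Claim_equal_format_suggestion_briefing_py := by
  intro suggestions _ _
  unfold Spec_format_suggestion_briefing_py format_suggestion_briefing_py format_suggestion_briefing_py_alt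
  by_cases hs : suggestions = []
  · simp [hs]
  · rw [if_neg hs, if_neg hs]
    have h := outer_eq suggestions bSections pvHeader (by decide)
    rw [show (["preference", "fact", "project_context"] : List String) = bSections.map Prod.fst from rfl, h]
    rfl
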